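/- GENERATED by tools/from_farm_form.py from prooffarm-gif/accepted/DGifBufferedInput.1/Proof.lean (a worked proof of the farm's unit `DGifBufferedInput.1`,
   accepted by the verdict) — do not edit. -/
import Gif.Spec.Units.DGifBufferedInput_1
import Gif.Spec.AllSegs
import Gif.Spec.Proved.DGifBufferedInput_1_Lemmas

open X86 X86.User Asan ProgX.Base ProgX.Base.Spec Gif.Spec

set_option maxRecDepth 4000
set_option maxHeartbeats 4000000

/-!
  `DGifBufferedInput.1` (0x106540 … 0x10659d, exits 0x10659d `Done` and 0x1065a8 `Refill`; 29 instructions; dgif_lib.c:1119-1120,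
  1143-1147): THE FIRST SEGMENT OF AN UNPROTECTED FUNCTION. One walk from the entry, both arms of the `je` of l.1120:
    1. the prelude: the entry's facts, the precondition, where pv / the cursor / `*NextByte` are (as numbers, so that the walker
       resolves the re-load of `Buf[0]` at 0x106590 through the stores to `Buf[1]` and `*NextByte`);
    2. the four check goals: `Buf[0]`, `Buf[1]`, `Buf[Buf[1]]` inside `pv.Buf[256]` (`bufLive`; the index is a byte:
       `bi1_index_lt`), `*NextByte` inside the caller's object (`OutPtr.buf.live`);
    3. each exit: the footprint since the entry in three windows (own stack, `pv.Buf`, `*NextByte`), `bi1_carry` (Lemmas.lean) for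
       `HeapInv` / `GifOK` / `rem`, then `Frame` field by field; at `Done` the measure by `bi1_dec_byte`.
-/

/-- Segment 1 of `DGifBufferedInput`: from the entry to `Done` (a byte of the buffer was handed out) or `Refill` (`Buf[0] = 0`). -/
theorem Gif.Spec.Proved.DGifBufferedInput_1_ok : Gif.Spec.DGifBufferedInput_1.Statement := by
  intro Lay hLay μ hμ u₀ hcode h_load1 h_store1 H rest frames F R e ret he hpre
  -- THE PRELUDE: the entry's facts, the precondition
  have he0 := he
  have hpre0 := hpre
  v_entry he
  obtain ⟨henv, hrdi, hrsi, hout⟩ := hpre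
  have hp := henv.heap
  have hok := henv.ok
  have hbase := hp.base
  -- where pv, the cursor and `*NextByte` are, as numbers
  have hpin := hok.owns.inside hp.inv.heap (o := (F.pv, 24936)) (List.mem_cons_of_mem _ List.mem_cons_self)
  simp only at hpin
  rw [hbase] at hpin
  have hpv_lo := hpin.1
  have hpv_hi := hpin.2.2.2.2
  clear hpin
  have hcur := henv.ctx.cursor_range hp.inv.shadow
  have hlow := hout.low
  have hhigh := hout.buf.high
  have habove := hout.above (Nat.le_refl 1) hp
  -- what the four check goals ask: the accesses lie inside `pv.Buf` (BY TYPE: byte indices), `*NextByte` is the caller's object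
  have hpvl := hok.pv_live
  have hnl := hout.buf.live
  -- THE WALK, both arms
  u_walk hcode [hμ.vendor] until [Gif.L.DGifBufferedInput.at_10659d, Gif.L.DGifBufferedInput.at_1065a8] span [ProgX.Base.L.textLo, ProgX.Base.L.textHi] side (v_side)
  case check_106554 =>
    -- dgif_lib.c:1120 the load of `Buf[0]`
    have hun : ShadowUntouched e.mem s_106554.mem := by v_untouched
    have hl := bufLive hpvl rest frames 0 1 (by omega)
    simp only [gfield] at hl
    exact hl.accSmall hp.inv.shadow hun _ 1 (by decide) (by u_omega) (by u_omega)
  case check_106562 =>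
    -- dgif_lib.c:1143 the load of `Buf[1]`
    have hun : ShadowUntouched e.mem s_106562.mem := by v_untouched
    have hl := bufLive hpvl rest frames 1 1 (by omega)
    simp only [gfield] at hl
    exact hl.accSmall hp.inv.shadow hun _ 1 (by decide) (by u_omega) (by u_omega)
  case check_10657b =>
    -- dgif_lib.c:1143 the load of `Buf[Buf[1]]`: a byte index
    have hun : ShadowUntouched e.mem s_10657b.mem := by v_untouched
    have hl := bufLive hpvl rest frames 0 256 (by omega)
    simp only [gfield] at hl
    have hidx := Gif.Spec.DGifBufferedInput_1.bi1_index_lt (e.mem.readLE (e.reg .rsi + 1) 1)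
    exact hl.accSmall hp.inv.shadow hun _ 1 (by decide) (by u_omega) (by u_omega)
  case check_106587 =>
    -- dgif_lib.c:1143 the store of `*NextByte`
    have hun : ShadowUntouched e.mem s_106587.mem := by v_untouched
    exact hnl.accSmall hp.inv.shadow hun _ 1 (by decide) (by u_omega) (by u_omega)
  · -- 0x1065a8: `Buf[0] = 0`, nothing was written but the pushes and the check call's return address
    have hun : ShadowUntouched e.mem s_10655c.mem := by v_untouched
    have hs3 : Mem.SameExcept
      [⟨(e.reg .rsp).toNat - 224, (e.reg .rsp).toNat⟩,
       ⟨F.pv + 88, F.pv + 344⟩,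
       ⟨(e.reg .rdx).toNat, (e.reg .rdx).toNat + 1⟩] e.mem s_10655c.mem := by
      rw [w_mem]
      u_same
    obtain ⟨hinv1, hok1, hrem1⟩ := Gif.Spec.DGifBufferedInput_1.bi1_carry henv hout he_align he_room he_top hun hs3
    -- THE EXIT ASSERTION: `Frame` at 0x1065a8 …
    have hframe : DGifBufferedInput.Frame Gif.L.DGifBufferedInput.at_1065a8 H rest frames F R u₀ e ret s_10655c := {
      entry := he0
      pre := hpre0
      next_above := habove
      rip := w_rip
      rsp := w_rsp
      r15 := w_kept.get .r15 rfl
      slot_r14 := by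
        rw [w_mem]
        u_read
      slot_r13 := by
        rw [w_mem]
        u_read
      slot_r12 := by
        rw [w_mem]
        u_read
      slot_rbp := by
        rw [w_mem]
        u_read
      slot_rbx := by
        rw [w_mem]
        u_read
      slot_ra := by
        rw [w_mem]
        u_frame he_retAddr
      inv := hinv1
      ok := hok1
      rem := Nat.le_of_eq hrem1
      same := by
        rw [w_mem]
        u_same
      code := ProgX.Base.conv_code_in w_eq
      abi := by
        refine ProgX.Base.abiInv_of ?_ ?_
        · rw [w_flags]
          simp only [X86.User.df_setStatus]
          exact w_df_106554
        · rw [w_mxcsr]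
          exact he_mx
    }
    -- … the arguments in their registers, the reader where it was
    refine ReachVia.done (Or.inr ?_)
    exact {
      body := {
        frame := hframe
        r13 := w_r13
        rbx := w_rbx
        r12 := w_r12
      }
      rem_eq := hrem1
    }
  · -- 0x10659d: `Buf[0] ≠ 0`: `Buf[1]` incremented, `*NextByte = Buf[old Buf[1]]`, `Buf[0]` decremented, `ebp = 1`
    have hun : ShadowUntouched e.mem s_106598.mem := by v_untouched
    have hs3 : Mem.SameExcept
      [⟨(e.reg .rsp).toNat - 224, (e.reg .rsp).toNat⟩,
       ⟨F.pv + 88, F.pv + 344⟩,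
       ⟨(e.reg .rdx).toNat, (e.reg .rdx).toNat + 1⟩] e.mem s_106598.mem := by
      rw [w_mem]
      u_same
    obtain ⟨hinv1, hok1, hrem1⟩ := Gif.Spec.DGifBufferedInput_1.bi1_carry henv hout he_align he_room he_top hun hs3
    -- THE EXIT ASSERTION: `Frame` at 0x10659d …
    have hframe : DGifBufferedInput.Frame Gif.L.DGifBufferedInput.at_10659d H rest frames F R u₀ e ret s_106598 := {
      entry := he0
      pre := hpre0
      next_above := habove
      rip := w_rip
      rsp := w_rsp
      r15 := w_kept.get .r15 rfl
      slot_r14 := by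
        rw [w_mem]
        u_read
      slot_r13 := by
        rw [w_mem]
        u_read
      slot_r12 := by
        rw [w_mem]
        u_read
      slot_rbp := by
        rw [w_mem]
        u_read
      slot_rbx := by
        rw [w_mem]
        u_read
      slot_ra := by
        rw [w_mem]
        u_frame he_retAddr
      inv := hinv1
      ok := hok1
      rem := Nat.le_of_eq hrem1
      same := by
        rw [w_mem]
        u_same
      code := ProgX.Base.conv_code_in w_eq
      abi := by
        refine ProgX.Base.abiInv_of ?_ ?_
        · rw [w_flags]
          simp only [X86.User.df_setStatus]
          exact w_df_106587
        · rw [w_mxcsr]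
          exact he_mx
    }
    -- … the result GIF_OK, and the measure: `Buf[0]` went down by one, the reader did not move
    refine ReachVia.done (Or.inl ?_)
    exact {
      frame := hframe
      res := by
        left
        rw [w_rbp]
        decide
      ok1 := by
        intro _
        have hb0 : e.mem.readLE (e.reg .rsi) 1 = rd e.mem (F.pv + 88) 1 := rd_eq_readLE e.mem (e.reg .rsi) (F.pv + 88) 1 hrsi
        have hlt := readLE1_lt e.mem (e.reg .rsi)
        have hdec := Gif.Spec.DGifBufferedInput_1.bi1_dec_byte (e.mem.readLE (e.reg .rsi) 1) hbr_10655c hlt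
        rw [hrem1, w_mem, rd_writeLE_same _ (e.reg .rsi) 1 _ (F.pv + 88) hrsi (by decide), ← hb0]
        omega
    }
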